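-- pv_equiv track=rewrite | github.com/NormPlum/freeCodeCamp_DailyCodingChallenges | 207.py | smallest_gap
-- ===== SOURCE A (Python) =====
-- def smallest_gap(s):
--     substrings = {}
--     for i, char in enumerate(s):
--         for j, char2 in enumerate(s[i+1:]):
--             if char2 == char:
--                 substrings[i] = j
--                 break
--
--     index = 0
--     smallest = len(s)
--     for i in substrings:
--         if substrings[i] < smallest:
--             index = i
--             smallest = substrings[i]
--
--     return s[index+1:index+1+smallest]
-- ===== SOURCE B (Python) =====
-- def smallest_gap(s):
--     last = {}
--     index = 0
--     smallest = len(s)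
--     for p, c in enumerate(s):
--         if c in last:
--             gap = p - last[c] - 1
--             if gap < smallest:
--                 index, smallest = last[c], gap
--         last[c] = p
--     return s[index + 1 : index + 1 + smallest]
-- ===== Notes on version B (the rewrite author's own statement) =====
-- stated objective: faster
-- what changed: Replaced the per-position forward scan for the next equal character (nested loops) by a single left-to-right pass that keeps the last-seen index of each character in a dict and updates the running minimum gap.
import Mathlib
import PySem

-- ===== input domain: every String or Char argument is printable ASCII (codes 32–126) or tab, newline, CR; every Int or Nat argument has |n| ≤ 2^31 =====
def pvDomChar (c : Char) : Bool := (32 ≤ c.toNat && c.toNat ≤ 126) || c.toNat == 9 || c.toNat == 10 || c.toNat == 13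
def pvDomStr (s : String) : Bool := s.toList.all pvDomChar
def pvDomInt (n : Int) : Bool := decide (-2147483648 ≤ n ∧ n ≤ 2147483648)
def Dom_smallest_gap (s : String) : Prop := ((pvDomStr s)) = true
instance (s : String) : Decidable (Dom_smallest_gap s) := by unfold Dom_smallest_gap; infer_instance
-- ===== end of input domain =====

-- B replaces A's quadratic per-position scan-ahead by one left-to-right pass keeping the
-- last-seen index of each character in a dict (objective: faster).

-- ===== PORT A =====
-- inner loop 'for j, char2 in enumerate(s[i+1:]): if char2 == char: …; break'
def pvFirstEqIdx (c : Char) : List Char → Int → Option Int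
  | [], _ => none
  | x :: xs, j => if x = c then some j else pvFirstEqIdx c xs (j + 1)

-- first loop: builds the dict 'substrings'
def pvBuildA (xs : List Char) : PySem.Dict Int Int :=
  (PySem.List.enumerate xs).foldl
    (fun d ic =>
      match pvFirstEqIdx ic.2 (PySem.List.slice xs (some (ic.1 + 1)) none) 0 with
      | some j => d.insert ic.1 j
      | none => d)
    PySem.Dict.empty

-- second loop iterates the dict keys and looks each key up; keys are unique, so folding
-- over d.items (each key with its value, in insertion order) is the faithful rendering.
def smallest_gap (s : String) : String :=
  let xs := s.toList
  let d := pvBuildA xs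
  let r := d.items.foldl
    (fun acc p => if p.2 < acc.2 then (p.1, p.2) else acc)
    ((0 : Int), PySem.Str.len s)
  String.ofList (PySem.List.slice xs (some (r.1 + 1)) (some (r.1 + 1 + r.2)))

-- ===== PORT B =====
def smallest_gap_alt (s : String) : String :=
  let xs := s.toList
  let r := (PySem.List.enumerate xs).foldl
    (fun (st : PySem.Dict Char Int × Int × Int) pc =>
      match st.1.get? pc.2 with
      | some q =>
          if pc.1 - q - 1 < st.2.2 then (st.1.insert pc.2 pc.1, q, pc.1 - q - 1)
          else (st.1.insert pc.2 pc.1, st.2.1, st.2.2)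
      | none => (st.1.insert pc.2 pc.1, st.2.1, st.2.2))
    (PySem.Dict.empty, (0 : Int), PySem.Str.len s)
  String.ofList (PySem.List.slice xs (some (r.2.1 + 1)) (some (r.2.1 + 1 + r.2.2)))

-- ===== PRECONDITION & SPEC =====
def Spec_smallest_gap (s : String) (out : String) : Prop := out = smallest_gap_alt s
instance (s : String) (out : String) : Decidable (Spec_smallest_gap s out) := by unfold Spec_smallest_gap; infer_instance

-- ===== CLAIM (what is proved, stated in full; the proofs are below) =====
def Claim_equal_smallest_gap : Prop := ∀ (s : String), Dom_smallest_gap s → Spec_smallest_gap s (smallest_gap s)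

-- ===== LEMMAS AND PROOFS =====

-- the min-selection step shared (after extraction) by both second phases
def pvStep (acc p : Int × Int) : Int × Int := if p.2 < acc.2 then (p.1, p.2) else acc

-- character at a Nat position (both ports only use in-range positions)
def pvAt (xs : List Char) (q : Nat) : Char := xs.getD q ' '

-- (q, p) are consecutive positions of the same character
def pvCand (xs : List Char) (q p : Nat) : Prop :=
  q < p ∧ p < xs.length ∧ pvAt xs p = pvAt xs q ∧ ∀ r, q < r → r < p → pvAt xs r ≠ pvAt xs q

-- A's candidate list (one entry per first position q), ordered by q
def pvLa (xs : List Char) : List (Int × Int) :=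
  (List.range xs.length).filterMap
    (fun q => (pvFirstEqIdx (pvAt xs q) (xs.drop (q + 1)) 0).map (fun g => ((q : Int), g)))

-- B's dict after the first k steps, and B's candidate list for the first k steps (ordered by p)
def pvDk (xs : List Char) (k : Nat) : PySem.Dict Char Int :=
  (List.range k).foldl (fun d i => d.insert (pvAt xs i) (i : Int)) PySem.Dict.empty

def pvLb (xs : List Char) (k : Nat) : List (Int × Int) :=
  (List.range k).filterMap
    (fun p => ((pvDk xs p).get? (pvAt xs p)).map (fun q => (q, (p : Int) - q - 1)))

-- ---- generic facts about the selection fold ----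
lemma pvStep_cases (L : List (Int × Int)) : ∀ (acc : Int × Int),
    (L.foldl pvStep acc = acc ∧ ∀ p ∈ L, acc.2 ≤ p.2) ∨
    (∃ L1 r L2, L = L1 ++ r :: L2 ∧ L.foldl pvStep acc = r ∧ r.2 < acc.2 ∧
      (∀ p ∈ L1, r.2 < p.2) ∧ (∀ p ∈ L2, r.2 ≤ p.2)) := by
  induction L with
  | nil => intro acc; left; simp
  | cons x L ih =>
    intro acc
    by_cases hx : x.2 < acc.2
    · right
      have hstep : (x :: L).foldl pvStep acc = L.foldl pvStep (x.1, x.2) := by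
        simp [List.foldl_cons, pvStep, hx]
      rcases ih (x.1, x.2) with ⟨heq, hall⟩ | ⟨L1, r, L2, hd, heq, hlt, h1, h2⟩
      · exact ⟨[], x, L, by simp, by simp [hstep, heq], hx, by simp, by simpa using hall⟩
      · refine ⟨x :: L1, r, L2, by simp [hd], by simp [hstep, heq], ?_, ?_, h2⟩
        · exact lt_trans hlt hx
        · intro p hp
          rcases List.mem_cons.mp hp with h | h
          · subst h; exact hlt
          · exact h1 p h
    · have hstep : (x :: L).foldl pvStep acc = L.foldl pvStep acc := by
        simp [List.foldl_cons, pvStep, hx]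
      rcases ih acc with ⟨heq, hall⟩ | ⟨L1, r, L2, hd, heq, hlt, h1, h2⟩
      · left
        refine ⟨by simp [hstep, heq], ?_⟩
        intro p hp
        rcases List.mem_cons.mp hp with h | h
        · subst h; omega
        · exact hall p h
      · right
        refine ⟨x :: L1, r, L2, by simp [hd], by simp [hstep, heq], hlt, ?_, h2⟩
        intro p hp
        rcases List.mem_cons.mp hp with h | h
        · subst h; omega
        · exact h1 p h

lemma pvStep_no (L : List (Int × Int)) : ∀ (acc : Int × Int), (∀ p ∈ L, ¬ p.2 < acc.2) →
    L.foldl pvStep acc = acc := by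
  induction L with
  | nil => intro acc _; rfl
  | cons x L ih =>
    intro acc h
    have hx : ¬ x.2 < acc.2 := h x (by simp)
    have hstep : (x :: L).foldl pvStep acc = L.foldl pvStep acc := by
      simp [List.foldl_cons, pvStep, hx]
    rw [hstep, ih acc (fun p hp => h p (List.mem_cons_of_mem _ hp))]

lemma pvStep_wins (L2 : List (Int × Int)) (r : Int × Int) (h3 : ∀ p ∈ L2, r.2 ≤ p.2) :
    ∀ (L1 : List (Int × Int)) (acc : Int × Int), r.2 < acc.2 → (∀ p ∈ L1, r.2 < p.2) →
    (L1 ++ r :: L2).foldl pvStep acc = (r.1, r.2) := by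
  intro L1
  induction L1 with
  | nil =>
    intro acc h1 _
    simp only [List.nil_append, List.foldl_cons, pvStep, h1, if_pos]
    exact pvStep_no L2 (r.1, r.2) (fun p hp => by have := h3 p hp; simp; omega)
  | cons x L1 ih =>
    intro acc h1 h2
    have hx := h2 x (by simp)
    simp only [List.cons_append, List.foldl_cons, pvStep]
    split_ifs with h
    · exact ih (x.1, x.2) (by simpa using hx) (fun p hp => h2 p (List.mem_cons_of_mem _ hp))
    · exact ih acc h1 (fun p hp => h2 p (List.mem_cons_of_mem _ hp))

-- ---- characterisation of A's candidate list ----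
lemma pvFirstEqIdx_some_iff (c : Char) (l : List Char) : ∀ (j v : Int),
    pvFirstEqIdx c l j = some v ↔
      ∃ g : Nat, v = j + (g : Int) ∧ g < l.length ∧ l.getD g ' ' = c ∧
        ∀ r < g, l.getD r ' ' ≠ c := by
  induction l with
  | nil => intro j v; simp [pvFirstEqIdx]
  | cons x l ih =>
    intro j v
    by_cases hx : x = c
    · simp only [pvFirstEqIdx, hx]
      constructor
      · rintro h
        exact ⟨0, by simpa using h.symm, by simp, by simpa using hx, by omega⟩
      · rintro ⟨g, hv, hg, hat, hbef⟩
        rcases g with _ | g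
        · simp at hv; simp [hv]
        · exact absurd (by simpa using hx) (by simpa using hbef 0 (by omega))
    · rw [show pvFirstEqIdx c (x::l) j = pvFirstEqIdx c l (j+1) from by simp [pvFirstEqIdx, hx],
         ih (j+1) v]
      constructor
      · rintro ⟨g, hv, hg, hat, hbef⟩
        refine ⟨g + 1, by push_cast; omega, by simpa using hg, by simpa using hat, ?_⟩
        intro r hr
        rcases r with _ | r
        · simpa using hx
        · simpa using hbef r (by omega)
      · rintro ⟨g, hv, hg, hat, hbef⟩
        rcases g with _ | g
        · exact absurd (by simpa using hat) hx
        · refine ⟨g, by push_cast at hv ⊢; omega, by simpa using hg, by simpa using hat, ?_⟩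
          intro r hr
          simpa using hbef (r + 1) (by omega)

lemma pvGetD_drop (l : List Char) (k j : Nat) : (l.drop k).getD j ' ' = l.getD (k + j) ' ' := by
  simp [List.getD, List.getElem?_drop]

lemma pvLa_mem (xs : List Char) (a : Int × Int) :
    a ∈ pvLa xs ↔ ∃ q p : Nat, a = ((q : Int), ((p : Int) - q - 1)) ∧ pvCand xs q p := by
  unfold pvLa
  rw [List.mem_filterMap]
  constructor
  · rintro ⟨q, hq, hf⟩
    rw [List.mem_range] at hq
    rcases Option.map_eq_some_iff.mp hf with ⟨v, hv, ha⟩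
    rcases (pvFirstEqIdx_some_iff _ _ 0 v).mp hv with ⟨g, hvg, hg, hat, hbef⟩
    refine ⟨q, q + 1 + g, ?_, ?_, ?_, ?_, ?_⟩
    · rw [← ha, hvg]; simp only [Prod.mk.injEq, true_and]; push_cast; omega
    · omega
    · rw [List.length_drop] at hg; omega
    · rw [pvGetD_drop] at hat; simpa [pvAt] using hat
    · intro r h1 h2
      have := hbef (r - (q + 1)) (by omega)
      rw [pvGetD_drop] at this
      simpa [pvAt, show q + 1 + (r - (q+1)) = r by omega] using this
  · rintro ⟨q, p, ha, hqp, hp, hat, hbet⟩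
    refine ⟨q, List.mem_range.mpr (by omega), ?_⟩
    rw [Option.map_eq_some_iff]
    refine ⟨(p : Int) - q - 1, ?_, by rw [ha]⟩
    rw [pvFirstEqIdx_some_iff]
    refine ⟨p - (q + 1), by omega, by rw [List.length_drop]; omega, ?_, ?_⟩
    · rw [pvGetD_drop]; simpa [pvAt, show q + 1 + (p - (q+1)) = p by omega] using hat
    · intro r hr
      rw [pvGetD_drop]
      exact hbet (q + 1 + r) (by omega) (by omega)

-- ---- characterisation of B's dict and candidate list ----
lemma pvDk_succ (xs : List Char) (k : Nat) :
    pvDk xs (k+1) = (pvDk xs k).insert (pvAt xs k) (k : Int) := by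
  unfold pvDk; rw [List.range_succ, List.foldl_append]; rfl

lemma pvDk_get? (xs : List Char) (k : Nat) (c : Char) (qi : Int) :
    (pvDk xs k).get? c = some qi ↔
      ∃ q : Nat, qi = (q : Int) ∧ q < k ∧ pvAt xs q = c ∧
        ∀ r, q < r → r < k → pvAt xs r ≠ c := by
  induction k with
  | zero => simp [pvDk, PySem.Dict.get?_empty]
  | succ k ih =>
    rw [pvDk_succ, PySem.Dict.get?_insert]
    by_cases hc : c = pvAt xs k
    · rw [if_pos hc]
      constructor
      · rintro h
        exact ⟨k, by simpa using h.symm, by omega, hc.symm, by omega⟩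
      · rintro ⟨q, hqi, hqk, hat, hlast⟩
        rcases Nat.lt_succ_iff_lt_or_eq.mp hqk with h | h
        · exact absurd hc.symm (hlast k h (by omega))
        · subst h; simp [hqi]
    · rw [if_neg hc, ih]
      constructor
      · rintro ⟨q, hqi, hqk, hat, hlast⟩
        refine ⟨q, hqi, by omega, hat, fun r h1 h2 => ?_⟩
        rcases Nat.lt_succ_iff_lt_or_eq.mp h2 with h | h
        · exact hlast r h1 h
        · subst h; exact fun hh => hc hh.symm
      · rintro ⟨q, hqi, hqk, hat, hlast⟩
        have hqk' : q ≠ k := fun h => hc (h ▸ hat).symm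
        exact ⟨q, hqi, by omega, hat, fun r h1 h2 => hlast r h1 (by omega)⟩

lemma pvLb_mem (xs : List Char) (a : Int × Int) :
    a ∈ pvLb xs xs.length ↔ ∃ q p : Nat, a = ((q : Int), ((p : Int) - q - 1)) ∧ pvCand xs q p := by
  unfold pvLb
  rw [List.mem_filterMap]
  constructor
  · rintro ⟨p, hp, hf⟩
    rw [List.mem_range] at hp
    rcases Option.map_eq_some_iff.mp hf with ⟨qi, hq, ha⟩
    rcases (pvDk_get? xs p (pvAt xs p) qi).mp hq with ⟨q, hqi, hqp, hat, hlast⟩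
    refine ⟨q, p, by rw [← ha, hqi], hqp, hp, hat.symm, ?_⟩
    intro r h1 h2 hh
    exact hlast r h1 h2 (hat ▸ hh ▸ rfl)
  · rintro ⟨q, p, ha, hqp, hp, hat, hbet⟩
    refine ⟨p, List.mem_range.mpr hp, ?_⟩
    rw [Option.map_eq_some_iff]
    refine ⟨(q : Int), ?_, ha.symm⟩
    rw [pvDk_get?]
    exact ⟨q, rfl, hqp, hat.symm, fun r h1 h2 hh => hbet r h1 h2 (by rw [hh, hat])⟩

-- ---- orderedness ----
lemma pvLa_pairwise (xs : List Char) : (pvLa xs).Pairwise (fun a b => a.1 < b.1) := by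
  unfold pvLa
  apply List.Pairwise.filterMap _ _ (List.pairwise_lt_range)
  intro q q' hqq x hx y hy
  rcases Option.map_eq_some_iff.mp hx with ⟨g, _, hxe⟩
  rcases Option.map_eq_some_iff.mp hy with ⟨g', _, hye⟩
  rw [← hxe, ← hye]
  simpa using hqq

lemma pvLb_pairwise (xs : List Char) :
    (pvLb xs xs.length).Pairwise (fun a b => a.1 + a.2 < b.1 + b.2) := by
  unfold pvLb
  apply List.Pairwise.filterMap _ _ (List.pairwise_lt_range)
  intro p p' hpp x hx y hy
  rcases Option.map_eq_some_iff.mp hx with ⟨qi, hq, hxe⟩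
  rcases Option.map_eq_some_iff.mp hy with ⟨qi', hq', hye⟩
  rw [← hxe, ← hye]
  simp only
  omega

-- ---- the two phases of each port reduced to the abstract data ----
lemma pvEnum_eq (xs : List Char) : ∀ s : Int,
    PySem.List.enumerate xs s
      = (List.range xs.length).map (fun k : Nat => ((s + (k : Int) : Int), pvAt xs k)) := by
  induction xs with
  | nil => intro s; simp [PySem.List.enumerate_nil]
  | cons x xs ih =>
    intro s
    rw [PySem.List.enumerate_cons, ih (s+1)]
    simp only [List.length_cons, List.range_succ_eq_map, List.map_cons, List.map_map]
    refine congrArg₂ _ (by simp [pvAt]) ?_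
    apply List.map_congr_left
    intro k _
    simp only [Function.comp]
    refine congrArg₂ _ (by push_cast; ring) ?_
    simp [pvAt]

lemma pvEnum_zero (xs : List Char) :
    PySem.List.enumerate xs 0
      = (List.range xs.length).map (fun k : Nat => (((k : Int) : Int), pvAt xs k)) := by
  rw [pvEnum_eq xs 0]; simp

lemma pvItemsCondInsert (f : Int × Char → Option Int) :
    ∀ (l : List (Int × Char)) (d : PySem.Dict Int Int),
      (∀ ic ∈ l, d.contains ic.1 = false) → (l.map (·.1)).Nodup →
      (l.foldl (fun d ic => match f ic with | some j => d.insert ic.1 j | none => d) d).items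
        = d.items ++ l.filterMap (fun ic => (f ic).map (fun j => (ic.1, j))) := by
  intro l
  induction l with
  | nil => intro d _ _; simp
  | cons ic l ih =>
    intro d hfresh hnd
    simp only [List.map_cons, List.nodup_cons] at hnd
    have hic : d.contains ic.1 = false := hfresh ic (by simp)
    simp only [List.foldl_cons, List.filterMap_cons]
    cases hf : f ic with
    | none =>
      rw [ih d (fun p hp => hfresh p (List.mem_cons_of_mem _ hp)) hnd.2]
      simp
    | some j =>
      rw [ih (d.insert ic.1 j) ?_ hnd.2]
      · rw [PySem.Dict.items_insert_of_not_contains _ _ hic]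
        simp
      · intro p hp
        rw [PySem.Dict.contains_insert]
        have hne : p.1 ≠ ic.1 := by
          intro h
          exact hnd.1 (by rw [← h]; exact List.mem_map_of_mem hp)
        simp [hne, hfresh p (List.mem_cons_of_mem _ hp)]

lemma pvA_items (xs : List Char) : (pvBuildA xs).items = pvLa xs := by
  unfold pvBuildA
  rw [pvItemsCondInsert _ (PySem.List.enumerate xs) PySem.Dict.empty
      (fun ic _ => PySem.Dict.contains_empty _)
      (by rw [PySem.List.map_fst_enumerate]; exact PySem.List.nodup_pyRange_one _ _)]
  rw [show (PySem.Dict.empty : PySem.Dict Int Int).items = [] from rfl, List.nil_append]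
  rw [pvEnum_zero xs, List.filterMap_map]
  unfold pvLa
  apply List.filterMap_congr
  intro q hq
  simp only [Function.comp]
  congr 1
  have hc : (q : Int) + 1 = ((q + 1 : Nat) : Int) := by push_cast; ring
  rw [hc, PySem.List.slice_from_natCast]

lemma pvB_fold_aux (xs : List Char) (n : Nat) : ∀ k : Nat,
    (((List.range k).map (fun i : Nat => (((i : Int) : Int), pvAt xs i))).foldl
      (fun (st : PySem.Dict Char Int × Int × Int) pc =>
        match st.1.get? pc.2 with
        | some q =>
            if pc.1 - q - 1 < st.2.2 then (st.1.insert pc.2 pc.1, q, pc.1 - q - 1)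
            else (st.1.insert pc.2 pc.1, st.2.1, st.2.2)
        | none => (st.1.insert pc.2 pc.1, st.2.1, st.2.2))
      (PySem.Dict.empty, (0 : Int), (n : Int)))
    = (pvDk xs k, (pvLb xs k).foldl pvStep ((0 : Int), (n : Int))) := by
  intro k
  induction k with
  | zero => simp [pvDk, pvLb]
  | succ k ih =>
    rw [List.range_succ, List.map_append, List.foldl_append, ih]
    cases hg : (pvDk xs k).get? (pvAt xs k) with
    | none =>
      have hlb : pvLb xs (k+1) = pvLb xs k := by
        unfold pvLb
        rw [List.range_succ, List.filterMap_append]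
        simp [hg]
      simp only [List.map_cons, List.map_nil, List.foldl_cons, List.foldl_nil, hg]
      rw [hlb, pvDk_succ]
    | some q =>
      have hlb : pvLb xs (k+1) = pvLb xs k ++ [(q, (k : Int) - q - 1)] := by
        unfold pvLb
        rw [List.range_succ, List.filterMap_append]
        simp [hg]
      simp only [List.map_cons, List.map_nil, List.foldl_cons, List.foldl_nil, hg]
      rw [hlb, pvDk_succ, List.foldl_append]
      simp only [List.foldl_cons, List.foldl_nil]
      unfold pvStep
      split_ifs with h
      · rfl
      · rfl

-- ---- the cross-order argument: both selections agree ----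
lemma pvSel_eq (xs : List Char) :
    (pvLa xs).foldl pvStep ((0 : Int), (xs.length : Int)) =
    (pvLb xs xs.length).foldl pvStep ((0 : Int), (xs.length : Int)) := by
  rcases pvStep_cases (pvLb xs xs.length) ((0 : Int), (xs.length : Int)) with
    ⟨heq, hall⟩ | ⟨L1, r, L2, hd, heq, hlt, h1, h2⟩
  · rw [heq]
    apply pvStep_no
    intro p hp
    have hpb : p ∈ pvLb xs xs.length := (pvLb_mem xs p).mpr ((pvLa_mem xs p).mp hp)
    have := hall p hpb
    omega
  · -- r is in both lists; decompose La around it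
    have hrb : r ∈ pvLb xs xs.length := by rw [hd]; simp
    have hra : r ∈ pvLa xs := (pvLa_mem xs r).mpr ((pvLb_mem xs r).mp hrb)
    rcases List.mem_iff_append.mp hra with ⟨A1, A2, hda⟩
    -- order facts
    have hpa := pvLa_pairwise xs
    rw [hda] at hpa
    rcases List.pairwise_append.mp hpa with ⟨_, hpc, hcross⟩
    have hA1 : ∀ a ∈ A1, a.1 < r.1 := fun a ha => hcross a ha r (by simp)
    have hA2 : ∀ a ∈ A2, r.1 < a.1 := fun a ha => (List.pairwise_cons.mp hpc).1 a ha
    have hpb := pvLb_pairwise xs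
    rw [hd] at hpb
    rcases List.pairwise_append.mp hpb with ⟨_, hpc', _⟩
    have hL2 : ∀ a ∈ L2, r.1 + r.2 < a.1 + a.2 := fun a ha => (List.pairwise_cons.mp hpc').1 a ha
    -- every element of Lb has value ≥ r.2
    have hvalb : ∀ a ∈ pvLb xs xs.length, a ≠ r → r.2 ≤ a.2 := by
      intro a ha hne
      rw [hd] at ha
      rcases List.mem_append.mp ha with h | h
      · exact le_of_lt (h1 a h)
      · rcases List.mem_cons.mp h with h | h
        · exact absurd h hne
        · exact h2 a h
    have hgoal : (pvLa xs).foldl pvStep ((0 : Int), (xs.length : Int)) = (r.1, r.2) := by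
      rw [hda]
      apply pvStep_wins
      · -- ∀ a ∈ A2, r.2 ≤ a.2
        intro a ha
        have haa : a ∈ pvLa xs := by rw [hda]; simp [ha]
        have hne : a ≠ r := by
          intro h
          have hlt' := hA2 a ha
          rw [h] at hlt'
          omega
        exact hvalb a ((pvLb_mem xs a).mpr ((pvLa_mem xs a).mp haa)) hne
      · exact hlt
      · -- ∀ a ∈ A1, r.2 < a.2
        intro a ha
        have haa : a ∈ pvLa xs := by rw [hda]; simp [ha]
        have halt : a.1 < r.1 := hA1 a ha
        have hab : a ∈ pvLb xs xs.length := (pvLb_mem xs a).mpr ((pvLa_mem xs a).mp haa)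
        rw [hd] at hab
        rcases List.mem_append.mp hab with h | h
        · exact h1 a h
        · rcases List.mem_cons.mp h with h | h
          · rw [h] at halt; omega
          · have := hL2 a h
            omega
    rw [hgoal, heq]

-- ===== VERDICT (by name: the statement is the Claim_ definition above) =====
theorem smallest_gap_spec : Claim_equal_smallest_gap := by
  intro s _
  unfold Spec_smallest_gap smallest_gap smallest_gap_alt
  simp only [PySem.Str.len_eq]
  have hstep : (fun (acc p : Int × Int) => if p.2 < acc.2 then (p.1, p.2) else acc) = pvStep := rfl
  rw [pvA_items, hstep, pvEnum_zero, pvB_fold_aux, pvSel_eq]
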